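-- pv_equiv track=rewrite | github.com/mandressi/hello-world | tictactoe_test.py | convert_AI_move_to_game_move
-- ===== SOURCE A (Python) =====
-- class Player:
--     black = 1
--     white = 2
--
-- def convert_AI_move_to_game_move(move,ai_player):
--     #position to [x,y]:player
--     #current_pieces = boardstate.getPieces()
--     if ai_player == "o": player = Player.white
--     else: player=Player.black
--     for i in range(0,9):
--         if move == 0:
--             return (0,0),player
--         elif move == 1:
--             return (1,0),player
--         elif move == 2:
--             return (2,0),player
--         elif move ==3:
--             return (0,1),player
--         elif move == 4:
--             return (1,1),player
--         elif move == 5: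
--             return (2,1),player
--         elif move ==6:
--             return (0,2),player
--         elif move == 7:
--             return (1,2),player
--         elif move == 8:
--             return (2,2),player
-- ===== SOURCE B (Python) =====
-- def convert_AI_move_to_game_move(move, ai_player):
--     # closed form: move index -> (column, row); player by one conditional
--     player = 2 if ai_player == "o" else 1
--     return (move % 3, move // 3), player
-- ===== Notes on version B (the rewrite author's own statement) =====
-- stated objective: simpler
-- what changed: Replaced the 9-branch if/elif chain inside a redundant range(9) loop with the closed-form coordinate arithmetic (move % 3, move // 3).
-- outside the precondition, e.g. on convert_AI_move_to_game_move(9, 'x'): A returns None, B returns ((0, 3), 1)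
import Mathlib
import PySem

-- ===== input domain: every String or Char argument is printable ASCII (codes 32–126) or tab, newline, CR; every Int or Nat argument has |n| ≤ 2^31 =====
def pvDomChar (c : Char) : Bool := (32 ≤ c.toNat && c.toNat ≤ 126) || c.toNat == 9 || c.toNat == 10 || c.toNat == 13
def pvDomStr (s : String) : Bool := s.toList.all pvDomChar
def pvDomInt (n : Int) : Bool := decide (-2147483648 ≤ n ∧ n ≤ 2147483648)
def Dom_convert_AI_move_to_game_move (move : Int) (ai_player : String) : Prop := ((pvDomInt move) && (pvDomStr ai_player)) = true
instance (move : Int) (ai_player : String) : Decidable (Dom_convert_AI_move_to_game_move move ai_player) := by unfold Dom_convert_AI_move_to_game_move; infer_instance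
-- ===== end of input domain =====

-- B replaces A's redundant range(9) loop of nine if/elif branches by the closed-form
-- coordinate arithmetic (move % 3, move // 3): simpler.

-- ===== PORT A =====
-- the range(0,9) loop: each iteration runs the same if/elif chain and returns on a match,
-- otherwise continues; falling out of the loop is Python's implicit None (excluded by Pre_).
def convert_AI_move_loopA : List Int → Int → Int → Option ((Int × Int) × Int)
  | [], _, _ => none
  | _ :: rest, move, player =>
    if move == 0 then some ((0, 0), player)
    else if move == 1 then some ((1, 0), player)
    else if move == 2 then some ((2, 0), player)
    else if move == 3 then some ((0, 1), player)
    else if move == 4 then some ((1, 1), player)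
    else if move == 5 then some ((2, 1), player)
    else if move == 6 then some ((0, 2), player)
    else if move == 7 then some ((1, 2), player)
    else if move == 8 then some ((2, 2), player)
    else convert_AI_move_loopA rest move player

def convert_AI_move_to_game_move (move : Int) (ai_player : String) : (Int × Int) × Int :=
  let player : Int := if ai_player == "o" then 2 else 1
  (convert_AI_move_loopA (PySem.List.pyRange 0 9 1) move player).getD ((0, 0), 0)

-- ===== PORT B =====
def convert_AI_move_to_game_move_alt (move : Int) (ai_player : String) : (Int × Int) × Int :=
  let player : Int := if ai_player == "o" then 2 else 1
  ((PySem.Int.mod move 3, PySem.Int.floordiv move 3), player)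

-- ===== PRECONDITION & SPEC =====
-- Pre_ excludes move outside 0..8, where A's loop falls through and Python returns None (no tuple value).
def Pre_convert_AI_move_to_game_move (move : Int) (_ai_player : String) : Prop :=
  0 ≤ move ∧ move ≤ 8
instance (move : Int) (ai_player : String) : Decidable (Pre_convert_AI_move_to_game_move move ai_player) := by unfold Pre_convert_AI_move_to_game_move; infer_instance
def pvWitness_convert_AI_move_to_game_move : Int × String := (4, "o")

def Spec_convert_AI_move_to_game_move (move : Int) (ai_player : String) (out : (Int × Int) × Int) : Prop := out = convert_AI_move_to_game_move_alt move ai_player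
instance (move : Int) (ai_player : String) (out : (Int × Int) × Int) : Decidable (Spec_convert_AI_move_to_game_move move ai_player out) := by unfold Spec_convert_AI_move_to_game_move; infer_instance

-- ===== CLAIM (what is proved, stated in full; the proofs are below) =====
def Claim_equal_convert_AI_move_to_game_move : Prop := ∀ (move : Int) (ai_player : String), Dom_convert_AI_move_to_game_move move ai_player → Pre_convert_AI_move_to_game_move move ai_player → Spec_convert_AI_move_to_game_move move ai_player (convert_AI_move_to_game_move move ai_player)

-- ===== LEMMAS AND PROOFS =====

-- ===== VERDICT (by name: the statement is the Claim_ definition above) =====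
theorem convert_AI_move_to_game_move_spec : Claim_equal_convert_AI_move_to_game_move := by
  intro move ai_player _ hpre
  obtain ⟨h0, h8⟩ := hpre
  unfold Spec_convert_AI_move_to_game_move convert_AI_move_to_game_move convert_AI_move_to_game_move_alt
  interval_cases move <;> rfl
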